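-- pv_equiv track=rewrite | github.com/tiedsandi/hr-management-django | apps/core/utils/formatting.py | _convert_django_format
-- ===== SOURCE A (Python) =====
-- def _convert_django_format(django_format):
--     """
--     Convert Django date format ke Python strftime format.
--
--     Django uses PHP-style formats (d/m/Y), Python uses % codes (%d/%m/%Y)
--     """
--     # Mapping Django format ke Python strftime
--     conversions = {
--         'd': '%d',   # Day 01-31
--         'm': '%m',   # Month 01-12
--         'Y': '%Y',   # Year 4 digits
--         'y': '%y',   # Year 2 digits
--         'H': '%H',   # Hour 00-23
--         'i': '%M',   # Minute 00-59
--         's': '%S',   # Second 00-59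
--         'l': '%A',   # Full day name (Senin)
--         'D': '%a',   # Short day name (Sen)
--     }
--
--     result = django_format
--     for django_code, python_code in conversions.items():
--         result = result.replace(django_code, python_code)
--
--     return result
-- ===== SOURCE B (Python) =====
-- def _convert_django_format(django_format):
--     """Convert Django date format to Python strftime format, one character at a time."""
--     def _code(ch):
--         if ch == 'd': return '%d'
--         if ch == 'm': return '%m'
--         if ch == 'Y': return '%Y'
--         if ch == 'y': return '%y'
--         if ch == 'H': return '%H'
--         if ch == 'i': return '%M'
--         if ch == 's': return '%S'
--         if ch == 'l': return '%A'
--         if ch == 'D': return '%a'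
--         return ch
--     parts = []
--     for ch in django_format:
--         parts.append(_code(ch))
--     return ''.join(parts)
-- ===== Notes on version B (the rewrite author's own statement) =====
-- stated objective: alternative
-- what changed: Replaces the dict of nine successive str.replace passes (each rescanning and rebuilding the whole string) with a single left-to-right scan that classifies each character through an if-chain helper and joins the pieces once; no dict and no replace at all.
import Mathlib
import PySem

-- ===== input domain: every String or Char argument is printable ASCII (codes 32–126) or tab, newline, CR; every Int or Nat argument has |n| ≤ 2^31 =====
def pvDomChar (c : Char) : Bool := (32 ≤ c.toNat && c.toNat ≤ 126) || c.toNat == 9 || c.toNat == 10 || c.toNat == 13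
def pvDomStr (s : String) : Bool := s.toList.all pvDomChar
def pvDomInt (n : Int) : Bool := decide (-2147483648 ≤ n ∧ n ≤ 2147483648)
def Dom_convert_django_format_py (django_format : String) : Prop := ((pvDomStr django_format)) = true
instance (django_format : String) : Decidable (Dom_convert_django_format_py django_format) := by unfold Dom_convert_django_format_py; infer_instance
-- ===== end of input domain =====

-- B replaces A's nine successive str.replace passes by one left-to-right scan classifying
-- each character through an if-chain helper (objective: alternative single-pass decomposition).

-- ===== PORT A =====
def convert_django_format_py (django_format : String) : String :=
  let conversions : PySem.Dict String String :=
    PySem.Dict.ofList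
      [("d", "%d"), ("m", "%m"), ("Y", "%Y"), ("y", "%y"), ("H", "%H"),
       ("i", "%M"), ("s", "%S"), ("l", "%A"), ("D", "%a")]
  (PySem.Dict.items conversions).foldl
    (fun result kv => PySem.Str.replace result kv.1 kv.2) django_format

-- ===== PORT B =====
-- port of Source B's helper _code: the if-chain on one character
def pvCode (ch : Char) : List Char :=
  if ch = 'd' then ['%', 'd']
  else if ch = 'm' then ['%', 'm']
  else if ch = 'Y' then ['%', 'Y']
  else if ch = 'y' then ['%', 'y']
  else if ch = 'H' then ['%', 'H']
  else if ch = 'i' then ['%', 'M']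
  else if ch = 's' then ['%', 'S']
  else if ch = 'l' then ['%', 'A']
  else if ch = 'D' then ['%', 'a']
  else [ch]

-- port of Source B's loop (append each piece, join once) as structural recursion
def pvAltGo : List Char → List Char
  | [] => []
  | ch :: rest => pvCode ch ++ pvAltGo rest

def convert_django_format_py_alt (django_format : String) : String :=
  String.ofList (pvAltGo django_format.toList)

-- ===== PRECONDITION & SPEC =====
def Spec_convert_django_format_py (django_format : String) (out : String) : Prop := out = convert_django_format_py_alt django_format
instance (django_format : String) (out : String) : Decidable (Spec_convert_django_format_py django_format out) := by unfold Spec_convert_django_format_py; infer_instance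

-- ===== CLAIM (what is proved, stated in full; the proofs are below) =====
def Claim_equal_convert_django_format_py : Prop := ∀ (django_format : String), Dom_convert_django_format_py django_format → Spec_convert_django_format_py django_format (convert_django_format_py django_format)

-- ===== LEMMAS AND PROOFS =====

-- Python's s.replace(old, new) with a ONE-character old is a per-character flatMap.
theorem pv_replace_go_single (c : Char) (new : List Char) :
    ∀ (l acc : List Char),
      PySem.Chars.replace.go [c] new l.length l acc
        = acc.reverse ++ l.flatMap (fun x => if x = c then new else [x]) := by
  intro l
  induction l with
  | nil => intro acc; simp [PySem.Chars.replace.go]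
  | cons x t ih =>
      intro acc
      by_cases hx : c = x
      · subst hx
        simp [PySem.Chars.replace.go, List.isPrefixOf, ih]
      · simp [PySem.Chars.replace.go, List.isPrefixOf, Ne.symm hx, hx, ih]

theorem pv_replace_single (c : Char) (new l : List Char) :
    PySem.Chars.replace l [c] new
      = l.flatMap (fun x => if x = c then new else [x]) := by
  simp [PySem.Chars.replace, pv_replace_go_single]

-- Composing the nine per-character substitutions on one character gives exactly pvCode:
-- no inserted character ('%' or an output letter) is a LATER key, so nothing cascades.
theorem pv_char_step (ch : Char) :
    List.flatMap
      (fun x1 =>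
        List.flatMap
          (fun x2 =>
            List.flatMap
              (fun x3 =>
                List.flatMap
                  (fun x4 =>
                    List.flatMap
                      (fun x5 =>
                        List.flatMap
                          (fun x6 =>
                            List.flatMap
                              (fun x7 =>
                                List.flatMap (fun x8 => if x8 = 'D' then ['%', 'a'] else [x8])
                                  (if x7 = 'l' then ['%', 'A'] else [x7]))
                              (if x6 = 's' then ['%', 'S'] else [x6]))
                          (if x5 = 'i' then ['%', 'M'] else [x5]))
                      (if x4 = 'H' then ['%', 'H'] else [x4]))
                  (if x3 = 'y' then ['%', 'y'] else [x3]))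
              (if x2 = 'Y' then ['%', 'Y'] else [x2]))
          (if x1 = 'm' then ['%', 'm'] else [x1]))
      (if ch = 'd' then ['%', 'd'] else [ch])
      = pvCode ch := by
  by_cases h1 : ch = 'd'; · subst h1; decide
  by_cases h2 : ch = 'm'; · subst h2; decide
  by_cases h3 : ch = 'Y'; · subst h3; decide
  by_cases h4 : ch = 'y'; · subst h4; decide
  by_cases h5 : ch = 'H'; · subst h5; decide
  by_cases h6 : ch = 'i'; · subst h6; decide
  by_cases h7 : ch = 's'; · subst h7; decide
  by_cases h8 : ch = 'l'; · subst h8; decide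
  by_cases h9 : ch = 'D'; · subst h9; decide
  simp [pvCode, h1, h2, h3, h4, h5, h6, h7, h8, h9]

theorem pv_altGo_eq_flatMap (l : List Char) : pvAltGo l = l.flatMap pvCode := by
  induction l with
  | nil => rfl
  | cons ch rest ih => simp [pvAltGo, ih]

-- ===== VERDICT (by name: the statement is the Claim_ definition above) =====
set_option maxHeartbeats 1000000 in
theorem convert_django_format_py_spec : Claim_equal_convert_django_format_py := by
  intro s _
  show convert_django_format_py s = convert_django_format_py_alt s
  unfold convert_django_format_py convert_django_format_py_alt
  apply String.toList_injective
  have hitems : PySem.Dict.items (PySem.Dict.ofList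
      [("d", "%d"), ("m", "%m"), ("Y", "%Y"), ("y", "%y"), ("H", "%H"),
       ("i", "%M"), ("s", "%S"), ("l", "%A"), ("D", "%a")] : PySem.Dict String String)
      = [("d", "%d"), ("m", "%m"), ("Y", "%Y"), ("y", "%y"), ("H", "%H"),
         ("i", "%M"), ("s", "%S"), ("l", "%A"), ("D", "%a")] := rfl
  dsimp only
  rw [hitems]
  simp only [List.foldl, String.toList_ofList, PySem.Str.toList_replace]
  simp only [show ("d" : String).toList = ['d'] from rfl, show ("m" : String).toList = ['m'] from rfl,
    show ("Y" : String).toList = ['Y'] from rfl, show ("y" : String).toList = ['y'] from rfl,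
    show ("H" : String).toList = ['H'] from rfl, show ("i" : String).toList = ['i'] from rfl,
    show ("s" : String).toList = ['s'] from rfl, show ("l" : String).toList = ['l'] from rfl,
    show ("D" : String).toList = ['D'] from rfl, show ("%d" : String).toList = ['%','d'] from rfl,
    show ("%m" : String).toList = ['%','m'] from rfl, show ("%Y" : String).toList = ['%','Y'] from rfl,
    show ("%y" : String).toList = ['%','y'] from rfl, show ("%H" : String).toList = ['%','H'] from rfl,
    show ("%M" : String).toList = ['%','M'] from rfl, show ("%S" : String).toList = ['%','S'] from rfl,
    show ("%A" : String).toList = ['%','A'] from rfl, show ("%a" : String).toList = ['%','a'] from rfl]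
  simp only [pv_replace_single, List.flatMap_assoc]
  rw [pv_altGo_eq_flatMap]
  apply List.flatMap_congr
  intro ch _
  exact pv_char_step ch
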